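-- pv_equiv track=rewrite | github.com/mohamad1014/buurt-sense | fastapi/app.py | _match_path
-- ===== SOURCE A (Python) =====
-- from typing import Any, Callable, Dict, Iterable, List, Mapping, Optional, Tuple, get_type_hints
--
-- def _match_path(template: List[tuple[bool, str]], path: str) -> Optional[Dict[str, str]]:
--     request_segments = [segment for segment in path.strip("/").split("/") if segment]
--     if len(template) != len(request_segments):
--         return None
--     params: Dict[str, str] = {}
--     for (is_param, value), segment in zip(template, request_segments):
--         if is_param:
--             params[value] = segment
--         elif value != segment:
--             return None
--     return params
-- ===== SOURCE B (Python) =====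
-- def _match_path(template, path):
--     # Single scan directly over the raw path string (no pre-splitting, no zip,
--     # no length pre-check): skip slashes, peel one segment at a time and match
--     # it against the template cursor, collecting parameter bindings as we go.
--     rest = path
--     params = {}
--     i = 0  # cursor into template
--     while rest:
--         if rest[0] == "/":
--             rest = rest[1:]
--             continue
--         seg, tail = _split_first(rest)
--         if i == len(template):
--             return None  # more path segments than template entries
--         is_param, value = template[i]
--         if is_param:
--             params[value] = seg
--         elif value != seg:
--             return None
--         i += 1
--         rest = tail
--     return params if i == len(template) else None
--
--
-- def _split_first(rest):
--     # cut at the first '/': scan for it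
--     for j, ch in enumerate(rest):
--         if ch == "/":
--             return rest[:j], rest[j:]
--     return rest, ""
-- ===== Notes on version B (the rewrite author's own statement) =====
-- stated objective: alternative
-- what changed: A normalizes the path with strip('/').split('/') plus an empty-segment filter, pre-checks lengths, then runs a fused validate-and-collect loop over zip(template, segments); B never splits the path at all: it does a single left-to-right scan of the raw string, skipping slash runs and peeling one segment at a time against a template cursor, with no length pre-check (a leftover cursor or leftover path yields None).
import Mathlib
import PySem

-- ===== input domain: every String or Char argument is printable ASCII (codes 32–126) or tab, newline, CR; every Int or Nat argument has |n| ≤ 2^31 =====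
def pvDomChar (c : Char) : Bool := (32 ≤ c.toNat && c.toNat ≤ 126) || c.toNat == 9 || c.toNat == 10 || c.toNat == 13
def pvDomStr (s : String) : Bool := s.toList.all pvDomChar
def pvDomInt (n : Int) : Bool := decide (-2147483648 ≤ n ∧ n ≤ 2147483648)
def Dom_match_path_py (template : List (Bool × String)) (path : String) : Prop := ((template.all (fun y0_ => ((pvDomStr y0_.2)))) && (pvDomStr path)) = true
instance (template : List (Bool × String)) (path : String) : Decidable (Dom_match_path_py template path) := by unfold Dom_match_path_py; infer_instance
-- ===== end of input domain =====

-- B replaces A's strip/split/filter pipeline + length guard + zip loop by a single recursive scan over the raw path string, peeling one segment at a time against a template cursor; return value proved equal, no speed claim.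


-- ===== PORT A =====
-- A's for-loop over zip(template, request_segments) with early return, carrying the params dict.
def matchLoopA : List ((Bool × String) × String) → PySem.Dict String String → Option (List (String × String))
  | [], params => some params.items
  | ((is_param, value), segment) :: rest, params =>
      if is_param then matchLoopA rest (params.insert value segment)
      else if value ≠ segment then none
      else matchLoopA rest params

def match_path_py (template : List (Bool × String)) (path : String) : Option (List (String × String)) :=
  let request_segments := ((PySem.Str.split? (PySem.Str.stripChars path "/") "/").getD []).filter (fun s => !(s == ""))
  if template.length ≠ request_segments.length then none
  else matchLoopA (template.zip request_segments) PySem.Dict.empty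

-- ===== PORT B =====
-- Source B's _split_first: scan for the first '/', return (rest[:j], rest[j:]) — (rest, "") if absent.
def splitFirstB : List Char → List Char × List Char
  | [] => ([], [])
  | c :: cs => if c == '/' then ([], c :: cs)
               else let r := splitFirstB cs; (c :: r.1, r.2)

-- termination measure for walkB (the port cites it in decreasing_by)
theorem splitFirstB_snd_le (cs : List Char) : (splitFirstB cs).2.length ≤ cs.length := by
  induction cs with
  | nil => simp [splitFirstB]
  | cons c cs ih =>
    simp only [splitFirstB]
    split
    · simp
    · simpa using Nat.le_succ_of_le ih

-- Source B's while loop over the remaining path, with the template cursor i and the params dict.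
def walkB (template : List (Bool × String)) : List Char → Nat → PySem.Dict String String → Option (List (String × String))
  | [], i, params => if i == template.length then some params.items else none
  | c :: cs, i, params =>
      if c == '/' then walkB template cs i params
      else
        let st := splitFirstB (c :: cs)
        if i == template.length then none
        else
          let pr := template.getD i (false, "")   -- guarded: i < template.length here
          if pr.1 then walkB template st.2 (i + 1) (params.insert pr.2 (String.ofList st.1))
          else if pr.2 ≠ String.ofList st.1 then none
          else walkB template st.2 (i + 1) params
  termination_by cs => cs.length
  decreasing_by
    · simp
    · simpa [splitFirstB, *] using Nat.lt_succ_of_le (splitFirstB_snd_le cs)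
    · simpa [splitFirstB, *] using Nat.lt_succ_of_le (splitFirstB_snd_le cs)

def match_path_py_alt (template : List (Bool × String)) (path : String) : Option (List (String × String)) :=
  walkB template path.toList 0 PySem.Dict.empty

-- ===== PRECONDITION & SPEC =====
def Spec_match_path_py (template : List (Bool × String)) (path : String) (out : Option (List (String × String))) : Prop := out = match_path_py_alt template path
instance (template : List (Bool × String)) (path : String) (out : Option (List (String × String))) : Decidable (Spec_match_path_py template path out) := by unfold Spec_match_path_py; infer_instance

-- ===== CLAIM (what is proved, stated in full; the proofs are below) =====
def Claim_equal_match_path_py : Prop := ∀ (template : List (Bool × String)) (path : String), Dom_match_path_py template path → Spec_match_path_py template path (match_path_py template path)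

-- ===== LEMMAS AND PROOFS =====

def consHead (pre : List Char) : List (List Char) → List (List Char)
  | [] => [pre]
  | x :: xs => (pre ++ x) :: xs

def mySplit : List Char → List (List Char)
  | [] => [[]]
  | c :: cs => if c == '/' then [] :: mySplit cs else consHead [c] (mySplit cs)

theorem mySplit_ne_nil (l : List Char) : mySplit l ≠ [] := by
  cases l with
  | nil => simp [mySplit]
  | cons c cs =>
    simp only [mySplit]
    split
    · simp
    · cases h : mySplit cs <;> simp [consHead]

theorem go_spec' : ∀ (fuel : Nat) (l cur : List Char) (acc : List (List Char)), l.length < fuel →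
    PySem.Chars.splitOn.go ['/'] fuel l cur acc = acc.reverse ++ consHead cur.reverse (mySplit l) := by
  intro fuel
  induction fuel with
  | zero => intro l cur acc h; omega
  | succ n ih =>
    intro l cur acc h
    cases l with
    | nil => simp [PySem.Chars.splitOn.go, mySplit, consHead]
    | cons c rest =>
      by_cases hc : c = '/'
      · subst hc
        rw [PySem.Chars.splitOn.go]
        simp only [List.isPrefixOf, BEq.rfl, Bool.true_and, if_true]
        rw [ih _ _ _ (by simpa using Nat.lt_of_succ_lt_succ h)]
        simp only [mySplit, BEq.rfl, if_true]
        cases hms : mySplit rest with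
        | nil => exact absurd hms (mySplit_ne_nil rest)
        | cons x xs => simp [hms, consHead]
      · rw [PySem.Chars.splitOn.go]
        have hpre : List.isPrefixOf ['/'] (c :: rest) = false := by
          simp [List.isPrefixOf]; exact fun h' => hc h'.symm
        rw [hpre]
        simp only [Bool.false_eq_true, if_false]
        rw [ih _ _ _ (by simpa using Nat.lt_of_succ_lt_succ h)]
        simp only [mySplit, beq_iff_eq, hc, if_false, List.reverse_cons]
        congr 1
        cases hms : mySplit rest <;> simp [consHead]

theorem splitOn_eq_mySplit (l : List Char) : PySem.Chars.splitOn l ['/'] = mySplit l := by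
  rw [PySem.Chars.splitOn, go_spec' _ _ _ _ (by omega)]
  cases h : mySplit l
  · exact absurd h (mySplit_ne_nil l)
  · simp [consHead]

def segs : List Char → List (List Char)
  | [] => []
  | c :: cs =>
      if c == '/' then segs cs
      else (c :: cs).takeWhile (fun d => !(d == '/')) :: segs ((c :: cs).dropWhile (fun d => !(d == '/')))
  termination_by cs => cs.length
  decreasing_by
    · simp
    · simpa [*] using Nat.lt_succ_of_le (List.length_dropWhile_le _ cs)

theorem mySplit_append (u v : List Char) (hu : ∀ c ∈ u, ¬ c = '/') :
    mySplit (u ++ v) = consHead u (mySplit v) := by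
  induction u with
  | nil =>
    cases h : mySplit v with
    | nil => exact absurd h (mySplit_ne_nil v)
    | cons x xs => simp [consHead, h]
  | cons c u ih =>
    have hc : ¬ c = '/' := hu c (by simp)
    simp only [List.cons_append, mySplit, beq_iff_eq, hc, if_false]
    rw [ih (fun d hd => hu d (by simp [hd]))]
    cases h : mySplit v with
    | nil => exact absurd h (mySplit_ne_nil v)
    | cons x xs => cases hu' : mySplit (u ++ v) <;> simp_all [consHead]

theorem filter_mySplit : ∀ (n : Nat) (cs : List Char), cs.length ≤ n →
    (mySplit cs).filter (fun x => !x.isEmpty) = segs cs := by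
  intro n
  induction n with
  | zero =>
    intro cs h
    have hnil : cs = [] := List.length_eq_zero_iff.mp (by omega)
    subst hnil; simp [mySplit, segs]
  | succ n ih =>
    intro cs hlen
    cases cs with
    | nil => simp [mySplit, segs]
    | cons c r =>
      by_cases hc : c = '/'
      · subst hc
        simp only [mySplit, BEq.rfl, if_true, segs, List.filter_cons]
        simp
        exact ih r (by simpa using Nat.le_of_succ_le_succ hlen)
      · have hdecomp := List.takeWhile_append_dropWhile (p := fun d => !(d == '/')) (l := c :: r)
        have hu : ∀ d ∈ (c :: r).takeWhile (fun d => !(d == '/')), ¬ d = '/' := by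
          intro d hd
          have := List.mem_takeWhile_imp hd
          simpa using this
        rw [segs]
        simp only [beq_iff_eq, hc, if_false]
        conv_lhs => rw [← hdecomp]
        rw [mySplit_append _ _ hu]
        have htw : (c :: r).takeWhile (fun d => !(d == '/')) = c :: r.takeWhile (fun d => !(d == '/')) := by
          simp [hc]
        cases hd : (c :: r).dropWhile (fun d => !(d == '/')) with
        | nil => simp [mySplit, consHead, htw, segs]
        | cons d d2 =>
          have hds : d = '/' := by
            have := List.head_dropWhile_not (p := fun d => !(d == '/')) (l := c :: r) (by rw [hd]; simp)
            simpa [hd] using this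
          subst hds
          simp only [mySplit, BEq.rfl, if_true, consHead]
          have hlt : d2.length ≤ n := by
            have h1 : ((c :: r).dropWhile (fun d => !(d == '/'))).length ≤ r.length := by
              simpa [List.dropWhile_cons, hc] using List.length_dropWhile_le (fun d => !(d == '/')) r
            rw [hd] at h1
            simp at h1 hlen
            omega
          rw [List.filter_cons]
          simp [htw, ih d2 hlt, segs]

theorem segs_allSlash (t : List Char) (ht : ∀ c ∈ t, c = '/') : segs t = [] := by
  induction t with
  | nil => simp [segs]
  | cons c t ih =>
    have : c = '/' := ht c (by simp)
    subst this
    simp only [segs, BEq.rfl, if_true]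
    exact ih (fun d hd => ht d (by simp [hd]))

theorem tw_slashes (t : List Char) (ht : ∀ c ∈ t, c = '/') :
    t.takeWhile (fun d => !(d == '/')) = [] ∧ t.dropWhile (fun d => !(d == '/')) = t := by
  cases t with
  | nil => simp
  | cons d t' =>
    have : d = '/' := ht d (by simp)
    subst this
    simp

theorem segs_append_slashes : ∀ (n : Nat) (xs t : List Char), xs.length ≤ n →
    (∀ c ∈ t, c = '/') → segs (xs ++ t) = segs xs := by
  intro n
  induction n with
  | zero =>
    intro xs t h ht
    have hnil : xs = [] := List.length_eq_zero_iff.mp (by omega)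
    subst hnil
    simp [segs, segs_allSlash t ht]
  | succ n ih =>
    intro xs t hlen ht
    cases xs with
    | nil => simp [segs, segs_allSlash t ht]
    | cons c r =>
      by_cases hc : c = '/'
      · subst hc
        simp only [List.cons_append, segs, BEq.rfl, if_true]
        exact ih r t (by simpa using Nat.le_of_succ_le_succ hlen) ht
      · rw [List.cons_append, segs, segs]
        simp only [beq_iff_eq, hc, if_false, ← List.cons_append]
        rw [List.takeWhile_append, List.dropWhile_append]
        have hdec := List.takeWhile_append_dropWhile (p := fun d => !(d == '/')) (l := c :: r)
        by_cases hall : (c :: r).dropWhile (fun d => !(d == '/')) = []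
        · have htw : (c :: r).takeWhile (fun d => !(d == '/')) = c :: r := by
            rw [hall] at hdec; simpa using hdec
          rw [htw, hall]
          simp [(tw_slashes t ht).1, (tw_slashes t ht).2, segs, segs_allSlash t ht]
        · have hlt : ((c :: r).takeWhile (fun d => !(d == '/'))).length ≠ (c :: r).length := by
            have := congrArg List.length hdec
            simp only [List.length_append] at this
            have h0 : 0 < ((c :: r).dropWhile (fun d => !(d == '/'))).length :=
              List.length_pos_of_ne_nil hall
            omega
          rw [if_neg hlt, if_neg (by simpa using hall)]
          congr 1
          have hle : ((c :: r).dropWhile (fun d => !(d == '/'))).length ≤ n := by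
            have : ((c :: r).dropWhile (fun d => !(d == '/'))).length ≤ r.length := by
              simpa [List.dropWhile_cons, hc] using List.length_dropWhile_le (fun d => !(d == '/')) r
            simp at hlen
            omega
          exact ih _ t hle ht

theorem segs_dropWhile_slash (cs : List Char) :
    segs (cs.dropWhile (fun c => c == '/')) = segs cs := by
  induction cs with
  | nil => simp
  | cons c r ih =>
    by_cases hc : c = '/'
    · subst hc
      simpa [segs] using ih
    · simp [hc]

theorem segs_stripChars (cs : List Char) :
    segs (PySem.Chars.stripChars cs ['/']) = segs cs := by
  rw [PySem.Chars.stripChars]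
  have hq : (fun c => (['/'] : List Char).contains c) = (fun c : Char => c == '/') := by
    funext c; rw [Bool.eq_iff_iff]; simp
  simp only [hq]
  set s1 := cs.dropWhile (fun c : Char => c == '/') with hs1
  have hdec := List.takeWhile_append_dropWhile (p := fun c : Char => c == '/') (l := s1.reverse)
  have hkey : (s1.reverse.dropWhile (fun c : Char => c == '/')).reverse ++
      (s1.reverse.takeWhile (fun c : Char => c == '/')).reverse = s1 := by
    rw [← List.reverse_append, hdec, List.reverse_reverse]
  have ht : ∀ c ∈ (s1.reverse.takeWhile (fun c : Char => c == '/')).reverse, c = '/' := by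
    intro c hcmem
    have := List.mem_takeWhile_imp (List.mem_reverse.mp hcmem)
    simpa using this
  calc segs (s1.reverse.dropWhile (fun c : Char => c == '/')).reverse
      = segs ((s1.reverse.dropWhile (fun c : Char => c == '/')).reverse ++
          (s1.reverse.takeWhile (fun c : Char => c == '/')).reverse) :=
        (segs_append_slashes _ _ _ (le_refl _) ht).symm
    _ = segs s1 := by rw [hkey]
    _ = segs cs := segs_dropWhile_slash cs

theorem splitFirstB_eq (cs : List Char) :
    splitFirstB cs = (cs.takeWhile (fun d => !(d == '/')), cs.dropWhile (fun d => !(d == '/'))) := by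
  induction cs with
  | nil => simp [splitFirstB]
  | cons c r ih =>
    by_cases hc : c = '/'
    · subst hc; simp [splitFirstB]
    · simp [splitFirstB, hc, ih]

theorem walkB_eq (template : List (Bool × String)) : ∀ (n : Nat) (cs : List Char), cs.length ≤ n →
    ∀ (i : Nat) (params : PySem.Dict String String), i ≤ template.length →
    walkB template cs i params =
      if template.length - i ≠ (segs cs).length then none
      else matchLoopA ((template.drop i).zip ((segs cs).map String.ofList)) params := by
  intro n
  induction n with
  | zero =>
    intro cs h i params hi
    have hnil : cs = [] := List.length_eq_zero_iff.mp (by omega)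
    subst hnil
    rw [walkB]
    by_cases hieq : i = template.length
    · subst hieq
      simp [segs, matchLoopA, List.drop_length]
    · have : template.length - i ≠ 0 := by omega
      simp [segs, hieq, this]
  | succ n ih =>
    intro cs hlen i params hi
    cases cs with
    | nil =>
      rw [walkB]
      by_cases hieq : i = template.length
      · subst hieq
        simp [segs, matchLoopA, List.drop_length]
      · have : template.length - i ≠ 0 := by omega
        simp [segs, hieq, this]
    | cons c r =>
      by_cases hc : c = '/'
      · subst hc
        rw [walkB]
        simp only [BEq.rfl, if_true]
        rw [ih r (by simpa using Nat.le_of_succ_le_succ hlen) i params hi]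
        have hsegs : segs ('/' :: r) = segs r := by simp [segs]
        rw [hsegs]
      · rw [walkB]
        have hcb : (c == '/') = false := by simpa using hc
        rw [hcb]
        simp only [Bool.false_eq_true, if_false]
        rw [splitFirstB_eq]
        have hsegs : segs (c :: r) = (c :: r).takeWhile (fun d => !(d == '/')) ::
            segs ((c :: r).dropWhile (fun d => !(d == '/'))) := by
          rw [segs]; simp [hc]
        by_cases hieq : i = template.length
        · subst hieq
          simp [hsegs]
        · have hilt : i < template.length := lt_of_le_of_ne hi hieq
          have hbe : (i == template.length) = false := by simpa using hieq
          rw [hbe]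
          simp only [Bool.false_eq_true, if_false]
          have hgetD : template.getD i (false, "") = template[i] := List.getD_eq_getElem template _ hilt
          have hdrop : template.drop i = template[i] :: template.drop (i + 1) :=
            (List.getElem_cons_drop hilt).symm
          have hdw : ((c :: r).dropWhile (fun d => !(d == '/'))).length ≤ n := by
            have : ((c :: r).dropWhile (fun d => !(d == '/'))).length ≤ r.length := by
              simpa [hc] using List.length_dropWhile_le (fun d => !(d == '/')) r
            simp at hlen
            omega
          rw [hgetD, hsegs, hdrop]
          set tw := (c :: r).takeWhile (fun d => !(d == '/')) with htw
          set dw := (c :: r).dropWhile (fun d => !(d == '/')) with hdwdef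
          rcases hpr : template[i] with ⟨isp, v⟩
          simp only []
          cases isp with
          | true =>
            rw [ih dw hdw (i + 1) (params.insert v (String.ofList tw)) (by omega)]
            simp only [List.map_cons, List.zip_cons_cons, matchLoopA, if_true]
            by_cases hcond : template.length - (i + 1) ≠ (segs dw).length
            · rw [if_pos hcond, if_pos (by simp at hcond ⊢; omega)]
            · rw [if_neg hcond, if_neg (by simp at hcond ⊢; omega)]
          | false =>
            by_cases hv : v = String.ofList tw
            · subst hv
              simp only [ne_eq, not_true_eq_false, Bool.false_eq_true, if_false]
              rw [ih dw hdw (i + 1) params (by omega)]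
              simp only [List.map_cons, List.zip_cons_cons, matchLoopA]
              by_cases hcond : template.length - (i + 1) ≠ (segs dw).length
              · rw [if_pos hcond, if_pos (by simp at hcond ⊢; omega)]
              · rw [if_neg hcond, if_neg (by simp at hcond ⊢; omega)]
                simp
            · simp only [ne_eq, hv, not_false_eq_true, if_true, Bool.false_eq_true, if_false]
              by_cases hcond : template.length - i ≠ (segs dw).length + 1
              · rw [if_pos (by simpa using hcond)]
              · rw [if_neg (by simpa using hcond)]
                simp [matchLoopA, hv]

theorem ofList_beq_empty (x : List Char) : (String.ofList x == "") = x.isEmpty := by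
  cases x with
  | nil => rfl
  | cons c cs =>
    have hne : String.ofList (c :: cs) ≠ "" := by
      intro h
      have := congrArg String.toList h
      simp at this
    simp [hne]

theorem request_segments_eq (path : String) :
    ((PySem.Str.split? (PySem.Str.stripChars path "/") "/").getD []).filter (fun s => !(s == "")) =
      (segs path.toList).map String.ofList := by
  rw [PySem.Str.split?]
  have hsep : ("/" : String).toList = ['/'] := rfl
  rw [hsep]
  have hstr : (PySem.Str.stripChars path "/").toList = PySem.Chars.stripChars path.toList ['/'] := by
    rw [PySem.Str.toList_stripChars, hsep]
  rw [hstr, PySem.Chars.split?]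
  simp only [List.isEmpty_cons, Bool.false_eq_true, if_false, Option.map_some, Option.getD_some]
  rw [List.filter_map]
  have hfun : ((fun s => !(s == "")) ∘ String.ofList) = (fun x : List Char => !x.isEmpty) := by
    funext x
    simp [Function.comp, ofList_beq_empty]
  rw [hfun, splitOn_eq_mySplit,
    filter_mySplit (PySem.Chars.stripChars path.toList ['/']).length _ (le_refl _),
    segs_stripChars]

-- ===== VERDICT (by name: the statement is the Claim_ definition above) =====
theorem match_path_py_spec : Claim_equal_match_path_py := by
  intro template path _
  unfold Spec_match_path_py
  rw [match_path_py, match_path_py_alt]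
  simp only [request_segments_eq]
  rw [walkB_eq template path.toList.length path.toList (le_refl _) 0 PySem.Dict.empty (by omega)]
  simp only [Nat.sub_zero, List.drop_zero, List.length_map]
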